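-- pv_equiv track=rewrite | github.com/CamJak/DNAMM | dna.py | bin_to_dna
-- ===== SOURCE A (Python) =====
-- def bin_to_dna(bin, rule):
--     rules = [
--         {"01": "A", "11": "C", "00": "T", "10": "G"},
--         {"00": "A", "10": "C", "01": "T", "11": "G"},
--         {"00": "A", "01": "C", "10": "T", "11": "G"},
--         {"01": "A", "00": "C", "11": "T", "10": "G"},
--         {"10": "A", "11": "C", "00": "T", "01": "G"},
--         {"11": "A", "01": "C", "10": "T", "00": "G"},
--         {"11": "A", "10": "C", "01": "T", "00": "G"},
--         {"10": "A", "00": "C", "11": "T", "01": "G"}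
--     ]
--
--     # Check if bin is odd and add a 0 to the front
--     if len(bin) % 2 != 0:
--         bin = "0" + bin
--
--     # Convert bin to DNA
--     out = ""
--     bin_list = [ bin[i:i+8] for i in range(0, len(bin), 8) ]
--     for i in range(len(bin_list)):
--         for j in range(0, len(bin_list[i]), 2):
--             out += rules[rule][bin_list[i][j:j+2]]
--
--         rule = (rule+1)%8
--
--     return out
-- ===== SOURCE B (Python) =====
-- def bin_to_dna(bin, rule):
--     # rule table r, indexed by pair value 2*b0+b1 -> letter
--     tables = ["TAGC", "ATCG", "ACTG", "CAGT", "TGAC", "GCTA", "GTCA", "CGAT"]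
--     if len(bin) % 2 != 0:
--         bin = "0" + bin
--     return "".join(
--         tables[(rule + k // 4) % 8][2 * (ord(bin[2 * k]) - 48) + (ord(bin[2 * k + 1]) - 48)]
--         for k in range(len(bin) // 2)
--     )
-- ===== Notes on version B (the rewrite author's own statement) =====
-- stated objective: simpler
-- what changed: Drops the 8-bit chunking, the list of slice chunks and the mutated rule counter: B makes one pass over pair positions k, picks the rule by the closed-form index (rule+k//4)%8 and indexes a 4-letter code string by the pair's numeric value instead of a dict lookup, joining with ''.join.
import Mathlib
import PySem

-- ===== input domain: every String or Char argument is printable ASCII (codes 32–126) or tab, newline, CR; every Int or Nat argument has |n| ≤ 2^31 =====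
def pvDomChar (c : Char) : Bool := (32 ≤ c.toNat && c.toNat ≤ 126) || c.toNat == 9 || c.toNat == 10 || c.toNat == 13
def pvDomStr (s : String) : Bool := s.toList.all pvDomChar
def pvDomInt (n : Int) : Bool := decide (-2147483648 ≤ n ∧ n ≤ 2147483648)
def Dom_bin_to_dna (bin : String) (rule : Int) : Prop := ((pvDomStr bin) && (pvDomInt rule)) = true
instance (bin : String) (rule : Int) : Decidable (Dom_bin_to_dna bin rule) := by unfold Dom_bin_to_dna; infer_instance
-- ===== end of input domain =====

-- B replaces A's 8-bit chunking, slice list and mutated rule counter by one pass over pair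
-- positions with the rule index computed in closed form (simpler decomposition; same cost).


-- ===== PORT A =====
-- the eight rule dicts, as Python dict literals (assoc lists in insertion order)
def pvRulesA : List (PySem.Dict (List Char) (List Char)) := [
  PySem.Dict.ofList [(['0','1'],['A']), (['1','1'],['C']), (['0','0'],['T']), (['1','0'],['G'])],
  PySem.Dict.ofList [(['0','0'],['A']), (['1','0'],['C']), (['0','1'],['T']), (['1','1'],['G'])],
  PySem.Dict.ofList [(['0','0'],['A']), (['0','1'],['C']), (['1','0'],['T']), (['1','1'],['G'])],
  PySem.Dict.ofList [(['0','1'],['A']), (['0','0'],['C']), (['1','1'],['T']), (['1','0'],['G'])],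
  PySem.Dict.ofList [(['1','0'],['A']), (['1','1'],['C']), (['0','0'],['T']), (['0','1'],['G'])],
  PySem.Dict.ofList [(['1','1'],['A']), (['0','1'],['C']), (['1','0'],['T']), (['0','0'],['G'])],
  PySem.Dict.ofList [(['1','1'],['A']), (['1','0'],['C']), (['0','1'],['T']), (['0','0'],['G'])],
  PySem.Dict.ofList [(['1','0'],['A']), (['0','0'],['C']), (['1','1'],['T']), (['0','1'],['G'])]]

-- inner loop 'for j in range(0, len(chunk), 2): out += rules[rule][chunk[j:j+2]]'
-- (KeyError/IndexError appear as the .getD defaults; Pre_ excludes those inputs)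
def pvInnerA (r : Int) : List Char → List Char
  | [] => []
  | [c0] => PySem.Dict.getD ((PySem.List.pyGet? pvRulesA r).getD PySem.Dict.empty) [c0] []
  | c0 :: c1 :: rest =>
      PySem.Dict.getD ((PySem.List.pyGet? pvRulesA r).getD PySem.Dict.empty) [c0, c1] []
        ++ pvInnerA r rest

-- '[ bin[i:i+8] for i in range(0, len(bin), 8) ]': successive 8-char slices
def pvChunks : List Char → List (List Char)
  | [] => []
  | c :: rest => ((c :: rest).take 8) :: pvChunks (rest.drop 7)
  termination_by l => l.length
  decreasing_by simp [List.length_drop]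

def bin_to_dna (bin : String) (rule : Int) : String :=
  let b0 := bin.toList
  let b := if b0.length % 2 ≠ 0 then '0' :: b0 else b0
  String.ofList ((pvChunks b).foldl
    (fun (st : List Char × Int) chunk =>
      (st.1 ++ pvInnerA st.2 chunk, PySem.Int.mod (st.2 + 1) 8)) ([], rule)).1

-- ===== PORT B =====
def pvTablesB : List (List Char) :=
  [['T','A','G','C'], ['A','T','C','G'], ['A','C','T','G'], ['C','A','G','T'],
   ['T','G','A','C'], ['G','C','T','A'], ['G','T','C','A'], ['C','G','A','T']]

-- one generator element: tables[(rule + k//4) % 8][2*(ord(b[2k])-48) + (ord(b[2k+1])-48)]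
def pvElemB (b : List Char) (rule : Int) (k : Int) : Char :=
  (PySem.List.pyGet?
      ((PySem.List.pyGet? pvTablesB (PySem.Int.mod (rule + PySem.Int.floordiv k 4) 8)).getD [])
      (2 * (((PySem.List.pyGetD b (2 * k) ' ').toNat : Int) - 48)
        + (((PySem.List.pyGetD b (2 * k + 1) ' ').toNat : Int) - 48))).getD ' '

def bin_to_dna_alt (bin : String) (rule : Int) : String :=
  let b0 := bin.toList
  let b := if b0.length % 2 ≠ 0 then '0' :: b0 else b0
  String.ofList ((PySem.List.pyRange 0 ((b.length / 2 : Nat) : Int) 1).map (pvElemB b rule))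

-- ===== PRECONDITION & SPEC =====
-- Pre_ excludes exactly the inputs where A raises: a KeyError on any character other than
-- '0'/'1', and an IndexError on rules[rule] when rule is outside [-8, 8) and bin is nonempty.
def Pre_bin_to_dna (bin : String) (rule : Int) : Prop :=
  (bin.toList.all (fun c => c == '0' || c == '1')) = true
    ∧ (bin.toList = [] ∨ (-8 ≤ rule ∧ rule < 8))
instance (bin : String) (rule : Int) : Decidable (Pre_bin_to_dna bin rule) := by
  unfold Pre_bin_to_dna; infer_instance

def pvWitness_bin_to_dna : String × Int := ("0110", 3)

def Spec_bin_to_dna (bin : String) (rule : Int) (out : String) : Prop := out = bin_to_dna_alt bin rule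
instance (bin : String) (rule : Int) (out : String) : Decidable (Spec_bin_to_dna bin rule out) := by unfold Spec_bin_to_dna; infer_instance

-- ===== CLAIM (what is proved, stated in full; the proofs are below) =====
def Claim_equal_bin_to_dna : Prop := ∀ (bin : String) (rule : Int), Dom_bin_to_dna bin rule → Pre_bin_to_dna bin rule → Spec_bin_to_dna bin rule (bin_to_dna bin rule)


-- ===== LEMMAS AND PROOFS =====

-- proof-side view of one B element, with the two pair characters explicit
def pvPair (r k : Int) (c0 c1 : Char) : Char :=
  (PySem.List.pyGet?
      ((PySem.List.pyGet? pvTablesB (PySem.Int.mod (r + PySem.Int.floordiv k 4) 8)).getD [])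
      (2 * (((c0.toNat : Int)) - 48) + (((c1.toNat : Int)) - 48))).getD ' '

-- proof-side reference: the output, pair by pair, with pair counter k
def pvGo : List Char → Int → Int → List Char
  | [], _, _ => []
  | [_], _, _ => []
  | c0 :: c1 :: rest, r, k => pvPair r k c0 c1 :: pvGo rest r (k + 1)

theorem pvPair_idx (r r' k k' : Int) (c0 c1 : Char)
    (h : PySem.Int.mod (r + PySem.Int.floordiv k 4) 8
       = PySem.Int.mod (r' + PySem.Int.floordiv k' 4) 8) :
    pvPair r k c0 c1 = pvPair r' k' c0 c1 := by
  unfold pvPair; rw [h]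

theorem pvPair_shift (r k : Int) (c0 c1 : Char) :
    pvPair (PySem.Int.mod (r + 1) 8) k c0 c1 = pvPair r (k + 4) c0 c1 := by
  apply pvPair_idx
  rw [PySem.Int.mod_eq_emod_of_pos (by norm_num),
      PySem.Int.mod_eq_emod_of_pos (by norm_num),
      PySem.Int.mod_eq_emod_of_pos (by norm_num),
      PySem.Int.floordiv_eq_ediv_of_pos (by norm_num),
      PySem.Int.floordiv_eq_ediv_of_pos (by norm_num)]
  omega

theorem pvPair_mod (r k : Int) (c0 c1 : Char) :
    pvPair r k c0 c1 = pvPair (PySem.Int.mod r 8) k c0 c1 := by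
  apply pvPair_idx
  rw [PySem.Int.mod_eq_emod_of_pos (by norm_num),
      PySem.Int.mod_eq_emod_of_pos (by norm_num),
      PySem.Int.mod_eq_emod_of_pos (by norm_num)]
  omega

theorem pvGo_ext (r r' d : Int) (h : ∀ k c0 c1, pvPair r k c0 c1 = pvPair r' (k + d) c0 c1) :
    ∀ (b : List Char) (k : Int), pvGo b r k = pvGo b r' (k + d)
  | [], _ => rfl
  | [_], _ => rfl
  | c0 :: c1 :: rest, k => by
      simp only [pvGo, h k c0 c1, pvGo_ext r r' d h rest (k + 1)]
      ring_nf

theorem pvGo_shift (r : Int) (b : List Char) (k : Int) :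
    pvGo b (PySem.Int.mod (r + 1) 8) k = pvGo b r (k + 4) :=
  pvGo_ext _ _ 4 (fun k c0 c1 => pvPair_shift r k c0 c1) b k

theorem pvGo_mod (r : Int) (b : List Char) (k : Int) :
    pvGo b r k = pvGo b (PySem.Int.mod r 8) k := by
  have := pvGo_ext r (PySem.Int.mod r 8) 0
    (fun k c0 c1 => by rw [add_zero]; exact pvPair_mod r k c0 c1) b k
  simpa using this

-- the dict lookup of A at rule r equals B's string-table lookup, for binary pair characters
theorem pvLookup_eq (r : Int) (h0 : 0 ≤ r) (h8 : r < 8) (c0 c1 : Char)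
    (hc0 : c0 = '0' ∨ c0 = '1') (hc1 : c1 = '0' ∨ c1 = '1') :
    PySem.Dict.getD ((PySem.List.pyGet? pvRulesA r).getD PySem.Dict.empty) [c0, c1] []
      = [(PySem.List.pyGet? ((PySem.List.pyGet? pvTablesB r).getD [])
           (2 * (((c0.toNat : Int)) - 48) + (((c1.toNat : Int)) - 48))).getD ' '] := by
  rcases hc0 with rfl | rfl <;> rcases hc1 with rfl | rfl <;> interval_cases r <;> rfl

theorem pvLookup_pair (r k : Int) (h0 : 0 ≤ r) (h8 : r < 8) (hk0 : 0 ≤ k) (hk4 : k < 4)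
    (c0 c1 : Char) (hc0 : c0 = '0' ∨ c0 = '1') (hc1 : c1 = '0' ∨ c1 = '1') :
    PySem.Dict.getD ((PySem.List.pyGet? pvRulesA r).getD PySem.Dict.empty) [c0, c1] []
      = [pvPair r k c0 c1] := by
  have hk : PySem.Int.mod (r + PySem.Int.floordiv k 4) 8 = r := by
    rw [PySem.Int.mod_eq_emod_of_pos (by norm_num),
        PySem.Int.floordiv_eq_ediv_of_pos (by norm_num)]
    omega
  unfold pvPair; rw [hk]
  exact pvLookup_eq r h0 h8 c0 c1 hc0 hc1

-- one 8-char chunk of A equals four pairs of the reference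
theorem pvChunk_eq (r : Int) (h0 : 0 ≤ r) (h8 : r < 8) :
    ∀ (j : Nat) (b : List Char), j ≤ 4 → b.length % 2 = 0 →
      (∀ c ∈ b, c = '0' ∨ c = '1') →
      pvGo b r (j : Int) = pvInnerA r (b.take (8 - 2 * j)) ++ pvGo (b.drop (8 - 2 * j)) r 4
  | j, [] => by
      intro _ _ _
      simp only [List.take_nil, List.drop_nil]
      rfl
  | j, [c] => by
      intro _ hl _
      simp at hl
  | j, c0 :: c1 :: rest => by
      intro hj hl hb
      by_cases hj4 : j = 4
      · subst hj4
        simp only [show 8 - 2 * 4 = 0 from rfl, List.take_zero, List.drop_zero, pvInnerA,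
          List.nil_append]
        norm_num
      · have hjlt : j < 4 := by omega
        have h82 : 8 - 2 * j = (6 - 2 * j) + 2 := by omega
        rw [h82]
        simp only [show ∀ m, m + 2 = m + 1 + 1 from fun m => rfl, List.take_succ_cons,
          List.drop_succ_cons, pvGo, pvInnerA]
        rw [pvLookup_pair r (j : Int) h0 h8 (by omega) (by exact_mod_cast hjlt) c0 c1
              (hb c0 (by simp)) (hb c1 (by simp))]
        have ih := pvChunk_eq r h0 h8 (j + 1) rest (by omega)
          (by simp at hl; omega) (fun c hc => hb c (by simp [hc]))
        rw [show ((j : Int) + 1) = ((j + 1 : Nat) : Int) by push_cast; ring, ih]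
        simp [show 8 - 2 * (j + 1) = 6 - 2 * j from by omega]

-- A's chunk loop computes the reference
theorem pvA_char : ∀ (b : List Char) (out : List Char) (r : Int), b.length % 2 = 0 →
    (∀ c ∈ b, c = '0' ∨ c = '1') → 0 ≤ r → r < 8 →
    ((pvChunks b).foldl
      (fun (st : List Char × Int) chunk =>
        (st.1 ++ pvInnerA st.2 chunk, PySem.Int.mod (st.2 + 1) 8)) (out, r)).1
      = out ++ pvGo b r 0
  | [], out, r => by
      intro _ _ _ _
      rw [show pvChunks ([] : List Char) = [] from by rw [pvChunks], List.foldl_nil]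
      rw [show pvGo [] r 0 = [] from rfl, List.append_nil]
  | c :: rest, out, r => by
      intro hl hb h0 h8
      rw [pvChunks]
      simp only [List.foldl_cons]
      have hlen' : (rest.drop 7).length % 2 = 0 := by
        simp only [List.length_cons] at hl
        simp only [List.length_drop]
        omega
      have hbits' : ∀ c' ∈ rest.drop 7, c' = '0' ∨ c' = '1' := fun c' hc' =>
        hb c' (List.mem_cons_of_mem c (List.mem_of_mem_drop hc'))
      have ih := pvA_char (rest.drop 7) (out ++ pvInnerA r ((c :: rest).take 8))
        (PySem.Int.mod (r + 1) 8) hlen' hbits'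
        (PySem.Int.mod_nonneg _ (by norm_num)) (PySem.Int.mod_lt _ (by norm_num))
      rw [ih, pvGo_shift]
      have hchunk := pvChunk_eq r h0 h8 0 (c :: rest) (by omega) hl hb
      simp only [Nat.cast_zero, Nat.sub_zero, Nat.mul_zero] at hchunk
      rw [show ((0 : Int) + 4) = 4 from rfl]
      rw [show (rest.drop 7) = (c :: rest).drop 8 from rfl]
      rw [hchunk, List.append_assoc]
  termination_by b _ _ => b.length
  decreasing_by simp [List.length_drop]

-- B's map over pair positions computes the reference
theorem pvB_char (r : Int) : ∀ (rest b : List Char) (s : Nat), b.drop (2 * s) = rest →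
    b.length % 2 = 0 →
    (PySem.List.pyRange (s : Int) ((b.length / 2 : Nat) : Int) 1).map (pvElemB b r)
      = pvGo rest r (s : Int)
  | [], b, s => by
      intro hd hl
      have hle : b.length ≤ 2 * s := List.drop_eq_nil_iff.mp hd
      rw [PySem.List.pyRange_one_eq_nil (by exact_mod_cast Nat.div_le_of_le_mul (by omega))]
      rfl
  | [c], b, s => by
      intro hd hl
      have := congrArg List.length hd
      simp only [List.length_drop, List.length_cons, List.length_nil] at this
      omega
  | c0 :: c1 :: rest, b, s => by
      intro hd hl
      have hlend := congrArg List.length hd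
      simp only [List.length_drop, List.length_cons] at hlend
      have hs : (s : Int) < ((b.length / 2 : Nat) : Int) := by
        exact_mod_cast show s < b.length / 2 by omega
      rw [PySem.List.pyRange_one_cons hs, List.map_cons]
      have hg0' : b[2 * s]? = some c0 := by
        have : (b.drop (2 * s))[0]? = some c0 := by rw [hd]; rfl
        rwa [List.getElem?_drop, Nat.add_zero] at this
      have hg1' : b[2 * s + 1]? = some c1 := by
        have : (b.drop (2 * s))[1]? = some c1 := by rw [hd]; rfl
        rwa [List.getElem?_drop] at this
      congr 1
      · unfold pvElemB pvPair
        rw [show (2 * (s : Int)) = ((2 * s : Nat) : Int) by push_cast; ring,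
            show (((2 * s : Nat) : Int) + 1) = ((2 * s + 1 : Nat) : Int) by push_cast; ring,
            PySem.List.pyGetD_natCast, PySem.List.pyGetD_natCast]
        rw [List.getD_eq_getElem?_getD, List.getD_eq_getElem?_getD, hg0', hg1']
        rfl
      · have hd' : b.drop (2 * (s + 1)) = rest := by
          have h2 : (b.drop (2 * s)).drop 2 = rest := by rw [hd]; rfl
          rw [List.drop_drop] at h2
          rw [show 2 * (s + 1) = 2 * s + 2 from by omega]
          exact h2
        have ih := pvB_char r rest b (s + 1) hd' hl
        rw [show ((s : Int) + 1) = ((s + 1 : Nat) : Int) by push_cast; ring]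
        exact ih

theorem pvRules_pyGet_norm (r : Int) (h1 : -8 ≤ r) (h2 : r < 8) :
    PySem.List.pyGet? pvRulesA r = PySem.List.pyGet? pvRulesA (PySem.Int.mod r 8) := by
  interval_cases r <;> rfl

theorem pvInner_congr (r r' : Int)
    (hg : PySem.List.pyGet? pvRulesA r = PySem.List.pyGet? pvRulesA r') :
    ∀ c, pvInnerA r c = pvInnerA r' c
  | [] => rfl
  | [c0] => by simp only [pvInnerA, hg]
  | c0 :: c1 :: rest => by
      simp only [pvInnerA, hg, pvInner_congr r r' hg rest]

theorem pvFoldl_norm (r : Int) (h1 : -8 ≤ r) (h2 : r < 8) (L : List (List Char))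
    (out : List Char) :
    (L.foldl (fun (st : List Char × Int) chunk =>
        (st.1 ++ pvInnerA st.2 chunk, PySem.Int.mod (st.2 + 1) 8)) (out, r)).1
    = (L.foldl (fun (st : List Char × Int) chunk =>
        (st.1 ++ pvInnerA st.2 chunk, PySem.Int.mod (st.2 + 1) 8)) (out, PySem.Int.mod r 8)).1 := by
  cases L with
  | nil => rfl
  | cons c L =>
      simp only [List.foldl_cons]
      rw [pvInner_congr r (PySem.Int.mod r 8) (pvRules_pyGet_norm r h1 h2) c]
      have hst : PySem.Int.mod (r + 1) 8 = PySem.Int.mod (PySem.Int.mod r 8 + 1) 8 := by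
        rw [PySem.Int.mod_eq_emod_of_pos (by norm_num),
            PySem.Int.mod_eq_emod_of_pos (by norm_num),
            PySem.Int.mod_eq_emod_of_pos (by norm_num)]
        omega
      rw [hst]

-- ===== VERDICT (by name: the statement is the Claim_ definition above) =====
theorem bin_to_dna_spec : Claim_equal_bin_to_dna := by
  intro bin rule _ hpre
  obtain ⟨hbits0, hr⟩ := hpre
  have hbits : ∀ c ∈ bin.toList, c = '0' ∨ c = '1' := by
    intro c hc
    have := List.all_eq_true.mp hbits0 c hc
    simpa using this
  unfold Spec_bin_to_dna bin_to_dna bin_to_dna_alt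
  by_cases hnil : bin.toList = []
  · simp only [hnil]
    norm_num [pvChunks, PySem.List.pyRange_one_eq_nil]
  · have hrr : -8 ≤ rule ∧ rule < 8 := hr.resolve_left hnil
    simp only []
    set b := if bin.toList.length % 2 ≠ 0 then '0' :: bin.toList else bin.toList with hb
    have hlen : b.length % 2 = 0 := by
      rw [hb]
      by_cases h : bin.toList.length % 2 = 0
      · rw [if_neg (by omega)]
        exact h
      · rw [if_pos (by omega)]
        simp only [List.length_cons]
        omega
    have hbitsb : ∀ c ∈ b, c = '0' ∨ c = '1' := by
      intro c hc
      rw [hb] at hc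
      split at hc
      · rcases List.mem_cons.mp hc with rfl | h
        · exact Or.inl rfl
        · exact hbits c h
      · exact hbits c hc
    rw [pvFoldl_norm rule hrr.1 hrr.2]
    rw [pvA_char b [] (PySem.Int.mod rule 8) hlen hbitsb
      (PySem.Int.mod_nonneg _ (by norm_num)) (PySem.Int.mod_lt _ (by norm_num))]
    have hBc := pvB_char rule b b 0 (by simp) hlen
    rw [Nat.cast_zero] at hBc
    rw [hBc, pvGo_mod rule b 0, List.nil_append]
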